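-- pv_equiv track=rewrite | github.com/PRDG-k/heuristic | 0.1/module.py | peak_no_charge
-- ===== SOURCE A (Python) =====
-- def peak_no_charge(row):
--     peak = ([i for i in range(97, 145)] + [i  for i in range(156, 265)] +
--             [i + 288 for i in range(97, 145)] + [i + 288  for i in range(156, 265)] +
--             [i + 288*2 for i in range(97, 145)] + [i + 288*2  for i in range(156, 265)] +
--             [i + 288*3 for i in range(97, 145)] + [i + 288*3  for i in range(156, 265)] +
--             [i + 288*4 for i in range(97, 145)] + [i + 288*4  for i in range(156, 265)])
--     if row['period'] in peak:
--         return 0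
--     else:
--         return row['charge']
-- ===== SOURCE B (Python) =====
-- def peak_no_charge(row):
--     k, r = divmod(row['period'], 288)
--     if 0 <= k <= 4 and (97 <= r < 145 or 156 <= r < 265):
--         return 0
--     return row['charge']
-- ===== Notes on version B (the rewrite author's own statement) =====
-- stated objective: simpler
-- what changed: Replaces building and linearly scanning a 785-element peak list with a closed-form O(1) arithmetic test on divmod(period, 288).
import Mathlib
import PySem

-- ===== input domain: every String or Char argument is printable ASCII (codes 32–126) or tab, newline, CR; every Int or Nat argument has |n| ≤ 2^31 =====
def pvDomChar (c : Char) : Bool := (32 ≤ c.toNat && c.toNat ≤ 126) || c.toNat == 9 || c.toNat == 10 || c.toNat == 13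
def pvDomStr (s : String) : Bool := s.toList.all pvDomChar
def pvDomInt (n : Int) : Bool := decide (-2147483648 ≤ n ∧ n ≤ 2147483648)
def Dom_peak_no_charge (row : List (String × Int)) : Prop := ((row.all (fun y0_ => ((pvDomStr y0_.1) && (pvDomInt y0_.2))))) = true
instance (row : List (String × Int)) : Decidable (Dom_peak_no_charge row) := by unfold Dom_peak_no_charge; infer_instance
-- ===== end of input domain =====

-- B replaces A's 785-element peak list and linear scan by a closed-form divmod test (objective: simpler).

-- ===== PORT A =====
-- the list 'peak' built by A's ten comprehensions
def peakList : List Int :=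
  PySem.List.pyRange 97 145 1 ++ PySem.List.pyRange 156 265 1 ++
  (PySem.List.pyRange 97 145 1).map (· + 288) ++ (PySem.List.pyRange 156 265 1).map (· + 288) ++
  (PySem.List.pyRange 97 145 1).map (· + 288*2) ++ (PySem.List.pyRange 156 265 1).map (· + 288*2) ++
  (PySem.List.pyRange 97 145 1).map (· + 288*3) ++ (PySem.List.pyRange 156 265 1).map (· + 288*3) ++
  (PySem.List.pyRange 97 145 1).map (· + 288*4) ++ (PySem.List.pyRange 156 265 1).map (· + 288*4)

def peak_no_charge (row : List (String × Int)) : Int :=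
  match row.lookup "period" with
  | none => 0    -- Python raises KeyError here; excluded by Pre_
  | some p =>
    if p ∈ peakList then 0
    else (row.lookup "charge").getD 0   -- KeyError outside Pre_

-- ===== PORT B =====
def peak_no_charge_alt (row : List (String × Int)) : Int :=
  match row.lookup "period" with
  | none => 0    -- Python raises KeyError here; excluded by Pre_
  | some p =>
    let k := PySem.Int.floordiv p 288
    let r := PySem.Int.mod p 288
    if 0 ≤ k ∧ k ≤ 4 ∧ (97 ≤ r ∧ r < 145 ∨ 156 ≤ r ∧ r < 265) then 0
    else (row.lookup "charge").getD 0   -- KeyError outside Pre_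

-- ===== PRECONDITION & SPEC =====
-- Pre_ excludes exactly the inputs where Python A raises KeyError: a row without a
-- 'period' key, or one whose period is not a peak slot and which lacks a 'charge' key.
def Pre_peak_no_charge (row : List (String × Int)) : Prop :=
  (row.lookup "period").isSome = true ∧
  (let p := (row.lookup "period").getD 0
   (0 ≤ p ∧ p < 1440 ∧ (97 ≤ p % 288 ∧ p % 288 < 145 ∨ 156 ≤ p % 288 ∧ p % 288 < 265)) ∨
   (row.lookup "charge").isSome = true)
instance (row : List (String × Int)) : Decidable (Pre_peak_no_charge row) := by
  unfold Pre_peak_no_charge; infer_instance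

def pvWitness_peak_no_charge : (List (String × Int)) := [("period", 100), ("charge", 7)]

def Spec_peak_no_charge (row : List (String × Int)) (out : Int) : Prop := out = peak_no_charge_alt row
instance (row : List (String × Int)) (out : Int) : Decidable (Spec_peak_no_charge row out) := by unfold Spec_peak_no_charge; infer_instance

-- ===== CLAIM (what is proved, stated in full; the proofs are below) =====
def Claim_equal_peak_no_charge : Prop := ∀ (row : List (String × Int)), Dom_peak_no_charge row → Pre_peak_no_charge row → Spec_peak_no_charge row (peak_no_charge row)

-- ===== LEMMAS AND PROOFS =====

theorem map_add_pyRange (a b c : Int) :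
    (PySem.List.pyRange a b 1).map (· + c) = PySem.List.pyRange (a + c) (b + c) 1 := by
  simp only [PySem.List.pyRange_one, List.map_map]
  have : b + c - (a + c) = b - a := by ring
  rw [this]
  apply List.map_congr_left
  intro k _
  simp; ring

theorem mem_peakList (p : Int) :
    p ∈ peakList ↔
      (0 ≤ PySem.Int.floordiv p 288 ∧ PySem.Int.floordiv p 288 ≤ 4 ∧
       (97 ≤ PySem.Int.mod p 288 ∧ PySem.Int.mod p 288 < 145 ∨
        156 ≤ PySem.Int.mod p 288 ∧ PySem.Int.mod p 288 < 265)) := by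
  rw [PySem.Int.floordiv_eq_ediv_of_pos (by norm_num : (0:Int) < 288),
      PySem.Int.mod_eq_emod_of_pos (by norm_num : (0:Int) < 288)]
  unfold peakList
  rw [map_add_pyRange, map_add_pyRange, map_add_pyRange, map_add_pyRange,
      map_add_pyRange, map_add_pyRange, map_add_pyRange, map_add_pyRange]
  simp only [List.mem_append, PySem.List.mem_pyRange_one]
  omega

-- ===== VERDICT (by name: the statement is the Claim_ definition above) =====
theorem peak_no_charge_spec : Claim_equal_peak_no_charge := by
  intro row _ _
  unfold Spec_peak_no_charge peak_no_charge peak_no_charge_alt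
  cases h : row.lookup "period" with
  | none => rfl
  | some p =>
    simp only []
    by_cases hm : p ∈ peakList
    · rw [if_pos hm, if_pos ((mem_peakList p).mp hm)]
    · rw [if_neg hm, if_neg (fun hc => hm ((mem_peakList p).mpr hc))]
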